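-- pv_equiv track=rewrite | github.com/divyasinghchouhan/cfg-homework | homework-3/generate_phrase.py | generate_phrase
-- ===== SOURCE A (Python) =====
-- from collections import Counter
--
-- def generate_phrase(characters, phrase):
--     new_characters = characters.lower()
--     new_phrase = phrase.lower()
--     char_counts = Counter(new_characters)
--     phrase_counts = Counter(new_phrase)
--     for key in phrase_counts:
--         if phrase_counts[key] > char_counts[key]:
--             return False
--     return True
-- ===== SOURCE B (Python) =====
-- from collections import Counter
--
-- def generate_phrase(characters, phrase):
--     supply = Counter(characters.lower())
--     for ch in phrase.lower():
--         supply[ch] -= 1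
--         if supply[ch] < 0:
--             return False
--     return True
-- ===== Notes on version B (the rewrite author's own statement) =====
-- stated objective: idiomatic
-- what changed: Builds only one Counter (of characters) and makes a single consuming pass over the phrase, decrementing the running supply and returning False as soon as an entry goes negative, instead of building a second Counter and comparing aggregated per-key counts.
import Mathlib
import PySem

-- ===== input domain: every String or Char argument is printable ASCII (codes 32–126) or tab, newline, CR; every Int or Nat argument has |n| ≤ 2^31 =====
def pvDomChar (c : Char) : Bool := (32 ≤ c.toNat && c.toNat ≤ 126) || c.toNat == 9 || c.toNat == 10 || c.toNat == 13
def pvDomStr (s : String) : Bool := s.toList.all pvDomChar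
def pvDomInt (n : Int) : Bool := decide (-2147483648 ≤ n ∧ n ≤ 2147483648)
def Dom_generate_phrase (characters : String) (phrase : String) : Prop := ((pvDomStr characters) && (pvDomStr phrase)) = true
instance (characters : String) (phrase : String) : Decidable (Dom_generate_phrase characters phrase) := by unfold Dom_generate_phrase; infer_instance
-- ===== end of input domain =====

-- B builds only one Counter and makes a single consuming pass over the phrase with early
-- exit, instead of building a second Counter and comparing per-key counts (objective: idiomatic).


-- ===== PORT A =====
-- 'for key in phrase_counts: if phrase_counts[key] > char_counts[key]: return False'
def pvLoopA (pc cc : PySem.Dict Char Int) : List Char → Bool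
  | [] => true
  | k :: ks => if pc.getD k 0 > cc.getD k 0 then false else pvLoopA pc cc ks

def generate_phrase (characters : String) (phrase : String) : Bool :=
  let new_characters := PySem.Str.lower characters
  let new_phrase := PySem.Str.lower phrase
  let char_counts := PySem.Dict.counter new_characters.toList
  let phrase_counts := PySem.Dict.counter new_phrase.toList
  pvLoopA phrase_counts char_counts phrase_counts.keys

-- ===== PORT B =====
-- 'for ch in phrase.lower(): supply[ch] -= 1; if supply[ch] < 0: return False'
def pvLoopB (supply : PySem.Dict Char Int) : List Char → Bool
  | [] => true
  | ch :: rest =>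
      let supply' := supply.modify ch 0 (· - 1)
      if supply'.getD ch 0 < 0 then false else pvLoopB supply' rest

def generate_phrase_alt (characters : String) (phrase : String) : Bool :=
  pvLoopB (PySem.Dict.counter (PySem.Str.lower characters).toList)
    (PySem.Str.lower phrase).toList

-- ===== PRECONDITION & SPEC =====
def Spec_generate_phrase (characters : String) (phrase : String) (out : Bool) : Prop := out = generate_phrase_alt characters phrase
instance (characters : String) (phrase : String) (out : Bool) : Decidable (Spec_generate_phrase characters phrase out) := by unfold Spec_generate_phrase; infer_instance

-- ===== CLAIM (what is proved, stated in full; the proofs are below) =====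
def Claim_equal_generate_phrase : Prop := ∀ (characters : String) (phrase : String), Dom_generate_phrase characters phrase → Spec_generate_phrase characters phrase (generate_phrase characters phrase)

-- ===== LEMMAS AND PROOFS =====

-- A's loop over any key list is true iff no listed key's phrase count exceeds its supply.
theorem pvLoopA_eq_true_iff (pc cc : PySem.Dict Char Int) (ks : List Char) :
    pvLoopA pc cc ks = true ↔ ∀ k ∈ ks, pc.getD k 0 ≤ cc.getD k 0 := by
  induction ks with
  | nil => simp [pvLoopA]
  | cons k ks ih =>
      simp only [pvLoopA, List.mem_cons]
      split_ifs with h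
      · constructor
        · intro hfalse; cases hfalse
        · intro hall; exact absurd (hall k (Or.inl rfl)) (by omega)
      · rw [ih]
        constructor
        · rintro hall x (rfl | hx)
          · omega
          · exact hall x hx
        · intro hall x hx; exact hall x (Or.inr hx)

-- B's loop succeeds iff the multiset of remaining phrase chars fits in the current supply.
theorem count_cons_int (ch c : Char) (rest : List Char) :
    (((ch :: rest).count c : Int)) = (rest.count c : Int) + (if c = ch then 1 else 0) := by
  by_cases hc : c = ch
  · subst hc; simp [List.count_cons]
  · have hc' : ¬ ch = c := fun h => hc h.symm
    simp [List.count_cons, hc, hc']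

-- B's loop succeeds iff every remaining phrase character still fits in the current supply.
theorem pvLoopB_eq_true_iff (ps : List Char) (d : PySem.Dict Char Int) :
    pvLoopB d ps = true ↔ ∀ c ∈ ps, (ps.count c : Int) ≤ d.getD c 0 := by
  induction ps generalizing d with
  | nil => simp [pvLoopB]
  | cons ch rest ih =>
      simp only [pvLoopB]
      rw [PySem.Dict.getD_modify_self]
      split_ifs with h
      · constructor
        · intro hfalse; cases hfalse
        · intro hall
          have h1 := hall ch List.mem_cons_self
          rw [count_cons_int, if_pos rfl] at h1
          omega
      · rw [ih]
        constructor
        · intro hall c hc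
          by_cases hx : c = ch
          · subst hx
            rw [count_cons_int, if_pos rfl]
            by_cases hmem : c ∈ rest
            · have h1 := hall c hmem
              rw [PySem.Dict.getD_modify, if_pos rfl] at h1
              omega
            · rw [List.count_eq_zero_of_not_mem hmem]
              push_cast
              omega
          · have hmem : c ∈ rest := by
              rcases List.mem_cons.mp hc with rfl | hm
              · exact absurd rfl hx
              · exact hm
            have h1 := hall c hmem
            rw [PySem.Dict.getD_modify, if_neg hx] at h1
            rw [count_cons_int, if_neg hx]
            omega
        · intro hall c hc
          by_cases hx : c = ch
          · subst hx
            have h1 := hall c List.mem_cons_self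
            rw [count_cons_int, if_pos rfl] at h1
            rw [PySem.Dict.getD_modify, if_pos rfl]
            omega
          · have h1 := hall c (List.mem_cons_of_mem ch hc)
            rw [count_cons_int, if_neg hx] at h1
            rw [PySem.Dict.getD_modify, if_neg hx]
            omega

-- Both sides reduce to the same per-character count inequality over all of Char.
theorem gp_eq (characters phrase : String) :
    generate_phrase characters phrase = generate_phrase_alt characters phrase := by
  unfold generate_phrase generate_phrase_alt
  set lc := (PySem.Str.lower characters).toList with hlc
  set lp := (PySem.Str.lower phrase).toList with hlp
  have hA : pvLoopA (PySem.Dict.counter lp) (PySem.Dict.counter lc)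
      (PySem.Dict.counter lp).keys = true ↔ ∀ c, (lp.count c : Int) ≤ (lc.count c : Int) := by
    rw [pvLoopA_eq_true_iff]
    simp only [PySem.Dict.getD_counter, PySem.Dict.keys_counter]
    constructor
    · intro hall c
      by_cases hc : c ∈ lp
      · exact hall c (by simpa [PySem.Set.mem_ofList] using hc)
      · simp [List.count_eq_zero_of_not_mem hc]
    · intro hall k _; exact hall k
  have hB : pvLoopB (PySem.Dict.counter lc) lp = true ↔
      ∀ c, (lp.count c : Int) ≤ (lc.count c : Int) := by
    rw [pvLoopB_eq_true_iff]
    simp only [PySem.Dict.getD_counter]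
    constructor
    · intro hall c
      by_cases hc : c ∈ lp
      · exact hall c hc
      · simp [List.count_eq_zero_of_not_mem hc]
    · intro hall c _; exact hall c
  cases hgb : pvLoopB (PySem.Dict.counter lc) lp
  · cases hga : pvLoopA (PySem.Dict.counter lp) (PySem.Dict.counter lc)
        (PySem.Dict.counter lp).keys
    · rfl
    · exact absurd (hB.mpr (hA.mp hga)) (by simp [hgb])
  · exact hA.mpr (hB.mp hgb)

-- ===== VERDICT (by name: the statement is the Claim_ definition above) =====
theorem generate_phrase_spec : Claim_equal_generate_phrase := by
  intro characters phrase _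
  exact gp_eq characters phrase
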